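-- pv_equiv track=rewrite | github.com/amitgit2020/NPTEL-Python-DSA-2020 | Week-3/Assignment.py | contracting_iterative
-- ===== SOURCE A (Python) =====
-- def contracting_iterative(l):
--     if len(l) < 3:
--         return(True)
--     for i in range(len(l)-2):
--         diff = abs(l[i+1]-l[i])
--         if diff <= abs(l[i+2]-l[i+1]):
--             return(False)
--     return(True)
-- ===== SOURCE B (Python) =====
-- def contracting_iterative(l):
--     diffs = [abs(y - x) for x, y in zip(l, l[1:])]
--     return diffs == sorted(diffs, reverse=True) and len(set(diffs)) == len(diffs)
-- ===== Notes on version B (the rewrite author's own statement) =====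
-- stated objective: alternative
-- what changed: Replaces A's fused triple-index scan with early return by a characterisation via ordering and distinctness: build the adjacent-absolute-difference table once, then the differences are strictly decreasing iff the table equals its descending sort and has no duplicates (checked with set()).
import Mathlib
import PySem

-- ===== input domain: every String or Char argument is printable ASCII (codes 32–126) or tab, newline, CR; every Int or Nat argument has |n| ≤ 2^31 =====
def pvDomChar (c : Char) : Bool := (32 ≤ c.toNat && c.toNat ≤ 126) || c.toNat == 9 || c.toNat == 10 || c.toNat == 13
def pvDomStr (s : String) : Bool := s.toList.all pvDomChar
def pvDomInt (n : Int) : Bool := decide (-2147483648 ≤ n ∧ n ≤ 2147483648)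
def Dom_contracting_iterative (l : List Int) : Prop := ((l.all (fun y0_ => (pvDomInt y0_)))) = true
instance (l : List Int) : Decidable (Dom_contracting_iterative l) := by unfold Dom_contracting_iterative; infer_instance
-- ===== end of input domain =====

-- B replaces A's fused triple-index scan by a different characterisation: the
-- adjacent-absolute-difference table is built once, and the answer is "the table
-- equals its descending sort and has no duplicates" (alternative, same result).

-- ===== PORT A =====
-- the for-loop with early 'return False', over the index list range(len(l)-2)
def contracting_iterative_loop (l : List Int) : List Int → Bool
  | [] => true
  | i :: rest =>
    let diff := |PySem.List.pyGetD l (i + 1) 0 - PySem.List.pyGetD l i 0|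
    if diff ≤ |PySem.List.pyGetD l (i + 2) 0 - PySem.List.pyGetD l (i + 1) 0| then false
    else contracting_iterative_loop l rest

def contracting_iterative (l : List Int) : Bool :=
  if (l.length : Int) < 3 then true
  else contracting_iterative_loop l (PySem.List.pyRange 0 ((l.length : Int) - 2) 1)

-- ===== PORT B =====
-- diffs = [abs(y - x) for x, y in zip(l, l[1:])]
def contracting_iterative_diffs (l : List Int) : List Int :=
  (l.zip (PySem.List.slice l (some 1) none)).map (fun p => |p.2 - p.1|)

-- diffs == sorted(diffs, reverse=True) and len(set(diffs)) == len(diffs)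
def contracting_iterative_alt (l : List Int) : Bool :=
  let diffs := contracting_iterative_diffs l
  decide (diffs = PySem.List.sorted diffs (fun x => x) true) &&
    decide (PySem.Set.len (PySem.Set.ofList diffs) = (diffs.length : Int))

-- ===== PRECONDITION & SPEC =====
def Spec_contracting_iterative (l : List Int) (out : Bool) : Prop := out = contracting_iterative_alt l
instance (l : List Int) (out : Bool) : Decidable (Spec_contracting_iterative l out) := by unfold Spec_contracting_iterative; infer_instance

-- ===== CLAIM (what is proved, stated in full; the proofs are below) =====
def Claim_equal_contracting_iterative : Prop := ∀ (l : List Int), Dom_contracting_iterative l → Spec_contracting_iterative l (contracting_iterative l)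

-- ===== LEMMAS AND PROOFS =====

-- A's loop is List.all of the per-index test
theorem contracting_iterative_loop_eq_all (l : List Int) (is : List Int) :
    contracting_iterative_loop l is =
      is.all (fun i =>
        decide (|PySem.List.pyGetD l (i + 2) 0 - PySem.List.pyGetD l (i + 1) 0| <
                |PySem.List.pyGetD l (i + 1) 0 - PySem.List.pyGetD l i 0|)) := by
  induction is with
  | nil => rfl
  | cons i rest ih =>
    simp only [contracting_iterative_loop, List.all_cons, ih]
    split_ifs with h
    · simp [not_lt.mpr h]
    · simp [lt_of_not_ge h]

-- index characterisation of the diffs table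
theorem contracting_iterative_diffs_length (l : List Int) :
    (contracting_iterative_diffs l).length = l.length - 1 := by
  simp [contracting_iterative_diffs, PySem.List.slice_from_one]

theorem contracting_iterative_diffs_getElem (l : List Int) (j : Nat)
    (h : j < (contracting_iterative_diffs l).length) :
    (contracting_iterative_diffs l)[j] =
      |l[j + 1]'(by have := contracting_iterative_diffs_length l; omega) -
       l[j]'(by have := contracting_iterative_diffs_length l; omega)| := by
  have hl := contracting_iterative_diffs_length l
  simp only [contracting_iterative_diffs, PySem.List.slice_from_one] at h ⊢
  rw [List.getElem_map, List.getElem_zip]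
  simp only [List.getElem_tail]

-- a loop-free reading of A: A is True iff each adjacent pair of absolute
-- differences strictly decreases
theorem contracting_iterative_iff (l : List Int) :
    contracting_iterative l = true ↔
      ∀ j : Nat, (hj : j + 2 < l.length) →
        |l[j + 2]'(by omega) - l[j + 1]'(by omega)| < |l[j + 1]'(by omega) - l[j]'(by omega)| := by
  by_cases h3 : 3 ≤ l.length
  · rw [contracting_iterative, if_neg (by omega), contracting_iterative_loop_eq_all,
        List.all_eq_true]
    constructor
    · intro h j hj
      have := h (j : Int) (by rw [PySem.List.mem_pyRange_one]; omega)
      rw [decide_eq_true_eq] at this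
      rw [PySem.List.pyGetD_eq_getElem _ _ (by omega) (by omega),
          PySem.List.pyGetD_eq_getElem _ _ (by omega) (by omega),
          PySem.List.pyGetD_eq_getElem _ _ (by omega) (by omega)] at this
      have e0 : ((j : Int)).toNat = j := by omega
      have e1 : ((j : Int) + 1).toNat = j + 1 := by omega
      have e2 : ((j : Int) + 2).toNat = j + 2 := by omega
      simp only [e0, e1, e2] at this
      exact this
    · intro h i hi
      rw [PySem.List.mem_pyRange_one] at hi
      rw [decide_eq_true_eq]
      rw [PySem.List.pyGetD_eq_getElem _ _ (by omega) (by omega),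
          PySem.List.pyGetD_eq_getElem _ _ (by omega) (by omega),
          PySem.List.pyGetD_eq_getElem _ _ (by omega) (by omega)]
      have e1 : (i + 1).toNat = i.toNat + 1 := by omega
      have e2 : (i + 2).toNat = i.toNat + 2 := by omega
      simp only [e1, e2]
      exact h i.toNat (by omega)
  · constructor
    · intro _ j hj; omega
    · intro _; rw [contracting_iterative, if_pos (by omega)]

-- len(set(xs)) == len(xs) forces distinct elements
theorem nodup_of_length_ofList_eq {α : Type} [BEq α] [LawfulBEq α] (xs : List α)
    (h : (PySem.Set.ofList xs).length = xs.length) : xs.Nodup := by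
  induction xs with
  | nil => exact List.nodup_nil
  | cons x xs ih =>
    rw [PySem.Set.ofList_cons] at h
    simp only [List.length_cons] at h
    by_cases hx : x ∈ xs
    · exfalso
      have hmem : x ∈ PySem.Set.ofList xs := (PySem.Set.mem_ofList xs x).mpr hx
      have hlt : ((PySem.Set.ofList xs).discard x).length < (PySem.Set.ofList xs).length := by
        unfold PySem.Set.discard
        refine List.length_filter_lt_length_iff_exists.mpr ⟨x, hmem, by simp⟩
      have hle := PySem.Set.length_ofList_le xs
      omega
    · have hdis : (PySem.Set.ofList xs).discard x = PySem.Set.ofList xs := by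
        unfold PySem.Set.discard
        refine List.filter_eq_self.mpr ?_
        intro a ha
        have : a ∈ xs := (PySem.Set.mem_ofList xs a).mp ha
        simp only [Bool.not_eq_eq_eq_not, Bool.not_true, beq_eq_false_iff_ne]
        exact fun e => hx (e ▸ this)
      rw [hdis] at h
      exact List.nodup_cons.mpr ⟨hx, ih (by omega)⟩

-- adjacent strict decrease propagates to all pairs
theorem pairwise_gt_of_adjacent (d : List Int)
    (h : ∀ j : Nat, (hj : j + 1 < d.length) → d[j + 1]'hj < d[j]'(by omega)) :
    d.Pairwise (· > ·) := by
  rw [List.pairwise_iff_getElem]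
  intro i j hi hj hij
  induction j with
  | zero => omega
  | succ k ih =>
    rcases Nat.lt_or_ge i k with h' | h'
    · exact lt_trans (h k hj) (ih (by omega) h')
    · have : i = k := by omega
      subst this
      exact h i hj

-- B is True iff the difference table is (· > ·)-pairwise
theorem contracting_iterative_alt_iff_pairwise (l : List Int) :
    contracting_iterative_alt l = true ↔ (contracting_iterative_diffs l).Pairwise (· > ·) := by
  unfold contracting_iterative_alt
  simp only [Bool.and_eq_true, decide_eq_true_eq, PySem.Set.len]
  constructor
  · rintro ⟨hs, hn⟩
    have hge : (contracting_iterative_diffs l).Pairwise (fun a b => b ≤ a) := by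
      rw [hs]; exact PySem.List.sorted_pairwise_rev _ _
    have hnd : (contracting_iterative_diffs l).Nodup :=
      nodup_of_length_ofList_eq _ (by exact_mod_cast hn)
    exact (hge.and hnd).imp (fun {a b} hab => lt_of_le_of_ne hab.1 (Ne.symm hab.2))
  · intro hp
    refine ⟨(PySem.List.sorted_rev_eq_self_of_pairwise _ _
      (hp.imp (fun {a b} hab => le_of_lt hab))).symm, ?_⟩
    rw [PySem.Set.ofList_eq_self_of_nodup _ (hp.imp (fun {a b} hab => ne_of_gt hab))]

-- ===== VERDICT (by name: the statement is the Claim_ definition above) =====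
theorem contracting_iterative_spec : Claim_equal_contracting_iterative := by
  intro l _
  unfold Spec_contracting_iterative
  rw [Bool.eq_iff_iff, contracting_iterative_iff l, contracting_iterative_alt_iff_pairwise l]
  have hl := contracting_iterative_diffs_length l
  constructor
  · intro h
    refine pairwise_gt_of_adjacent _ ?_
    intro j hj
    rw [contracting_iterative_diffs_getElem l j (by omega),
        contracting_iterative_diffs_getElem l (j + 1) (by omega)]
    exact h j (by omega)
  · intro hp j hj
    have hadj := (List.pairwise_iff_getElem.mp hp) j (j + 1) (by omega) (by omega) (by omega)
    rw [contracting_iterative_diffs_getElem l j (by omega),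
        contracting_iterative_diffs_getElem l (j + 1) (by omega)] at hadj
    exact hadj
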